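-- pv_equiv track=rewrite | github.com/lliryc/text-editing | data/tokenizer.py | restore_tokenized_text
-- ===== SOURCE A (Python) =====
-- def restore_tokenized_text(text, tokens):
--     restored_tokens = []
--     raw_index = 0  # Pointer to track the current position in the raw text
--
--     for token in tokens:
--         # Remove "##" prefix for subword tokens to get the base form
--         is_subword = token.startswith("##")
--         token_base = token[2:] if is_subword else token
--
--         # Extract the substring from the raw text corresponding to the token's length
--         matching_substring = ""
--         for char in text[raw_index:]:
--             matching_substring += char
--             # Stop when the matching substring length matches the token base
--             if len(matching_substring) == len(token_base):
--                 break
--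
--         # Add the restored token (preserving the "##" prefix if present)
--         restored_tokens.append(("##" if is_subword else "") + matching_substring)
--
--         # Update the pointer in the raw text
--         raw_index += len(matching_substring)
--
--     assert len(restored_tokens) == len(tokens)
--
--     detokenized_text = "".join([token[2:] if token.startswith("##") else token for token in restored_tokens])
--
--     if detokenized_text != text:
--         import pdb; pdb.set_trace
--
--     return restored_tokens
-- ===== SOURCE B (Python) =====
-- def restore_tokenized_text(text, tokens):
--     # Two-pass, table-first: base forms, then a prefix-sum offset table, then one emit pass
--     # with pure slicing (no mutable pointer). Intended fix: an empty-base token ("" or "##")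
--     # restores to the empty string instead of swallowing the rest of the text as A does.
--     bases = [(t[2:], True) if t.startswith("##") else (t, False) for t in tokens]
--     offsets = [0]
--     for base, _ in bases:
--         offsets.append(offsets[-1] + len(base))
--     return [("##" if sub else "") + text[off:off + len(base)]
--             for (base, sub), off in zip(bases, offsets)]
-- ===== Notes on version B (the rewrite author's own statement) =====
-- stated objective: faster
-- what changed: Replaces the mutable text pointer and the char-by-char inner copy loop (matching_substring += char) with a table-first two-pass scheme: precompute base forms and a prefix-sum offset table, then emit each token by one clamped slice text[off:off+len(base)].
-- outside the precondition, e.g. on restore_tokenized_text('a', ['']): A returns ['a'], B returns ['']; on restore_tokenized_text('abc', ['a', '##', 'b']): A returns ['a', '##bc', ''], B returns ['a', '##', 'b']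
import Mathlib
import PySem

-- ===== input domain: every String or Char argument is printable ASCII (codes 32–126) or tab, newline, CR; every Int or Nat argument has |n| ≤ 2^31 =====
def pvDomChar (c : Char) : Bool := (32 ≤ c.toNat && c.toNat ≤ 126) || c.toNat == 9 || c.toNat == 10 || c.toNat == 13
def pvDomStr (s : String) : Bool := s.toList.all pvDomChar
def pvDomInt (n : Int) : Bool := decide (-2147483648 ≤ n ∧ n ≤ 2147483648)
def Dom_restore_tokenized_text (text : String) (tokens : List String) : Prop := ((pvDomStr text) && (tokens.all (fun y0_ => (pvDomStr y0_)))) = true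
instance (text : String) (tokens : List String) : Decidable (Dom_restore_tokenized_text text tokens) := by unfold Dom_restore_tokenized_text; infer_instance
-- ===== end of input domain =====

-- B replaces A's mutable text pointer and char-by-char copy loop by a two-pass scheme
-- (base forms + prefix-sum offset table, then pure clamped slicing); equivalence is
-- claimed under Pre_, which excludes malformed token lists with an empty-base token
-- ('' or '##') before the text is exhausted (see Pre_ below). A's trailing
-- assert/join/pdb lines never affect the return value and are omitted from the ports.


-- ===== PORT A =====
-- inner loop: for char in rest: matching += char; if len(matching) == target: break
def pvALoop (target : Int) : List Char → List Char → List Char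
  | [], acc => acc
  | c :: rest, acc =>
      let acc' := acc ++ [c]
      if (acc'.length : Int) = target then acc' else pvALoop target rest acc'

def restore_tokenized_text (text : String) (tokens : List String) : List String :=
  let st := tokens.foldl (fun (st : List String × Nat) token =>
    let is_subword := PySem.Str.startswith token "##"
    let token_base := if is_subword then PySem.Str.slice token (some 2) none else token
    let matching := pvALoop (PySem.Str.len token_base)
        (PySem.List.slice text.toList (some (st.2 : Int)) none) []
    (st.1 ++ [String.ofList ((if is_subword then ['#', '#'] else []) ++ matching)],
     st.2 + matching.length)) ([], 0)
  st.1

-- ===== PORT B =====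
def restore_tokenized_text_alt (text : String) (tokens : List String) : List String :=
  let bases := tokens.map (fun t =>
    if PySem.Str.startswith t "##" then (PySem.Str.slice t (some 2) none, true) else (t, false))
  let offsets := bases.foldl
    (fun (os : List Int) b => os ++ [PySem.List.pyGetD os (-1) 0 + PySem.Str.len b.1]) [0]
  (bases.zip offsets).map (fun p =>
    String.ofList ((if p.1.2 then ['#', '#'] else []) ++
      PySem.List.slice text.toList (some p.2) (some (p.2 + PySem.Str.len p.1.1))))

-- ===== PRECONDITION & SPEC =====
-- base length of a token (length after stripping a leading "##")
def pvBaseLen (t : String) : Int :=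
  if PySem.Str.startswith t "##" then PySem.Str.len t - 2 else PySem.Str.len t

-- Pre_ excludes malformed token lists in which a token with an empty base ('' or '##')
-- occurs before the raw text is exhausted: no real tokenizer emits empty tokens, no
-- specification covers them, and there A's inner loop happens never to break and returns
-- the whole remaining text while B restores the empty base — both values are accidental.
def Pre_restore_tokenized_text (text : String) (tokens : List String) : Prop :=
  ¬ ∃ i ∈ List.range tokens.length,
      pvBaseLen (tokens.getD i "") = 0 ∧
      ((tokens.take i).map pvBaseLen).sum < PySem.Str.len text
instance (text : String) (tokens : List String) : Decidable (Pre_restore_tokenized_text text tokens) := by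
  unfold Pre_restore_tokenized_text; infer_instance

def pvWitness_restore_tokenized_text : String × List String :=
  ("hello world", ["he", "##llo", " wo", "##rld"])

def Spec_restore_tokenized_text (text : String) (tokens : List String) (out : List String) : Prop := out = restore_tokenized_text_alt text tokens
instance (text : String) (tokens : List String) (out : List String) : Decidable (Spec_restore_tokenized_text text tokens out) := by unfold Spec_restore_tokenized_text; infer_instance

-- ===== CLAIM (what is proved, stated in full; the proofs are below) =====
def Claim_equal_restore_tokenized_text : Prop := ∀ (text : String) (tokens : List String), Dom_restore_tokenized_text text tokens → Pre_restore_tokenized_text text tokens → Spec_restore_tokenized_text text tokens (restore_tokenized_text text tokens)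

-- ===== LEMMAS AND PROOFS =====

-- proof-side helpers (used only by the lemmas below)
def pvBaseS (t : String) : String × Bool :=
  if PySem.Str.startswith t "##" then (PySem.Str.slice t (some 2) none, true) else (t, false)

def pvEmitA (txt : List Char) : List (String × Bool) → Nat → List String
  | [], _ => []
  | p :: bs, o =>
      let m := if p.1.toList.length = 0 then txt.drop o else (txt.drop o).take p.1.toList.length
      String.ofList ((if p.2 then ['#', '#'] else []) ++ m) :: pvEmitA txt bs (o + m.length)

def pvEmitB (txt : List Char) : List (String × Bool) → Nat → List String
  | [], _ => []
  | p :: bs, o =>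
      String.ofList ((if p.2 then ['#', '#'] else []) ++ (txt.drop o).take p.1.toList.length)
        :: pvEmitB txt bs (o + p.1.toList.length)

def pvScan : List (String × Bool) → Int → List Int
  | [], _ => []
  | b :: bs, l => (l + PySem.Str.len b.1) :: pvScan bs (l + PySem.Str.len b.1)

-- A's inner loop with target 0 copies the whole remainder (the break never fires)
lemma pvALoop_zero (rest acc : List Char) : pvALoop 0 rest acc = acc ++ rest := by
  induction rest generalizing acc with
  | nil => simp [pvALoop]
  | cons c r ih =>
      simp only [pvALoop]
      rw [if_neg (show ¬(((acc ++ [c]).length : Int) = 0) by simp; omega), ih]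
      simp

-- A's inner loop with positive target takes the next (target - |acc|) characters
lemma pvALoop_pos (t : Nat) (rest acc : List Char) (h : acc.length < t) :
    pvALoop (t : Int) rest acc = acc ++ rest.take (t - acc.length) := by
  induction rest generalizing acc with
  | nil => simp [pvALoop]
  | cons c r ih =>
      simp only [pvALoop]
      by_cases he : acc.length + 1 = t
      · rw [if_pos (show (((acc ++ [c]).length : Nat) : Int) = (t : Int) by simp; omega)]
        have ht : t - acc.length = 1 := by omega
        simp [ht]
      · rw [if_neg (show ¬((((acc ++ [c]).length : Nat) : Int) = (t : Int)) by simp; omega),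
          ih (acc ++ [c]) (by simp; omega)]
        have ht : t - acc.length = (t - (acc.length + 1)) + 1 := by omega
        simp [ht, List.take_succ_cons]

lemma pvALoop_nil_acc (t : Nat) (rest : List Char) :
    pvALoop (t : Int) rest [] = if t = 0 then rest else rest.take t := by
  by_cases h : t = 0
  · simp [h, pvALoop_zero]
  · rw [if_neg h, pvALoop_pos t rest [] (by simp; omega)]
    simp

-- drop past the end is unchanged by clamping the index
lemma pvDrop_min (txt : List Char) (o : Nat) : txt.drop (min o txt.length) = txt.drop o := by
  by_cases h : o ≤ txt.length
  · rw [min_eq_left h]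
  · rw [min_eq_right (by omega), List.drop_length, List.drop_eq_nil_of_le (by omega)]

lemma pvStrLen_eq (t : String) : PySem.Str.len t = (t.toList.length : Int) := by
  simp [PySem.Str.len]

-- base length: the Int form used by D_ versus the char-list length of pvBaseS
lemma pvBaseLen_eq (t : String) : pvBaseLen t = ((pvBaseS t).1.toList.length : Int) := by
  unfold pvBaseLen pvBaseS
  by_cases h : PySem.Str.startswith t "##"
  · have h' : PySem.Chars.startswith t.toList ("##".toList) = true := by simpa using h
    have hpre := (PySem.Chars.startswith_iff _ _).mp h'
    have h2 : 2 ≤ t.toList.length := by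
      have hle := hpre.length_le
      have he : ("##".toList).length = 2 := by decide
      omega
    rw [if_pos h, if_pos h, pvStrLen_eq, PySem.Str.toList_slice, PySem.Chars.slice_eq_listSlice,
      PySem.List.slice_from t.toList (by norm_num : (0:Int) ≤ 2)]
    rw [List.length_drop]
    omega
  · rw [if_neg h, if_neg h, pvStrLen_eq]

-- sums of base lengths, Int (D_) versus Nat (proof side)
lemma pvSum_eq (ts : List String) :
    (ts.map pvBaseLen).sum = ((((ts.map (fun t => (pvBaseS t).1.toList.length)).sum : Nat) : Int)) := by
  induction ts with
  | nil => simp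
  | cons t ts ih =>
      simp only [List.map_cons, List.sum_cons, pvBaseLen_eq, ih]
      push_cast
      ring

-- the central equivalence: outside the bad region the two emit passes agree
lemma pvEmit_eq (txt : List Char) (bs : List (String × Bool)) (o : Nat)
    (good : ∀ i, (h : i < bs.length) → bs[i].1.toList.length = 0 →
      txt.length ≤ o + ((bs.take i).map (fun p => p.1.toList.length)).sum) :
    pvEmitA txt bs (min o txt.length) = pvEmitB txt bs o := by
  induction bs generalizing o with
  | nil => simp [pvEmitA, pvEmitB]
  | cons p bs ih =>
      have hgood' : ∀ i, (h : i < bs.length) → bs[i].1.toList.length = 0 →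
          txt.length ≤ (o + p.1.toList.length) + ((bs.take i).map (fun p => p.1.toList.length)).sum := by
        intro i hi hz
        have := good (i + 1) (by simpa using hi) (by simpa using hz)
        simp only [List.take_succ_cons, List.map_cons, List.sum_cons] at this
        omega
      simp only [pvEmitA, pvEmitB]
      by_cases hL : p.1.toList.length = 0
      · have hlen : txt.length ≤ o := by
          have := good 0 (by simp) (by simpa using hL)
          simpa using this
        have hmin : min o txt.length = txt.length := by omega
        rw [if_pos hL, hL, hmin, List.drop_length]
        have ihapp := ih o (by simpa [hL] using hgood')
        rw [hmin] at ihapp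
        simp only [List.take_zero, List.length_nil, Nat.add_zero,
          List.drop_eq_nil_of_le hlen]
        rw [ihapp]
      · rw [if_neg hL, pvDrop_min txt o]
        have harg : min o txt.length + ((txt.drop o).take p.1.toList.length).length
            = min (o + p.1.toList.length) txt.length := by
          simp [List.length_take, List.length_drop]
          omega
        rw [harg]
        have ihapp := ih (o + p.1.toList.length) hgood'
        rw [ihapp]

-- port A unfolds to pvEmitA over the base table
lemma pvA_eq (text : String) (tokens : List String) (acc : List String) (o : Nat) :
    (tokens.foldl (fun (st : List String × Nat) token =>
      let is_subword := PySem.Str.startswith token "##"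
      let token_base := if is_subword then PySem.Str.slice token (some 2) none else token
      let matching := pvALoop (PySem.Str.len token_base)
          (PySem.List.slice text.toList (some (st.2 : Int)) none) []
      (st.1 ++ [String.ofList ((if is_subword then ['#', '#'] else []) ++ matching)],
       st.2 + matching.length)) (acc, o)).1
    = acc ++ pvEmitA text.toList (tokens.map pvBaseS) o := by
  induction tokens generalizing acc o with
  | nil => simp [pvEmitA]
  | cons t ts ih =>
      have hslice : PySem.List.slice text.toList (some (o : Int)) none = text.toList.drop o :=
        PySem.List.slice_from_natCast text.toList o
      have hlen : PySem.Str.len (if PySem.Str.startswith t "##" then PySem.Str.slice t (some 2) none else t)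
          = ((pvBaseS t).1.toList.length : Int) := by
        unfold pvBaseS
        by_cases h : PySem.Str.startswith t "##"
        · rw [if_pos h, if_pos h]
          exact pvStrLen_eq _
        · rw [if_neg h, if_neg h]
          exact pvStrLen_eq _
      have hsub : (PySem.Str.startswith t "##") = (pvBaseS t).2 := by
        unfold pvBaseS
        by_cases h : PySem.Str.startswith t "##"
        · rw [if_pos h, h]
        · rw [if_neg h, Bool.eq_false_iff.mpr h]
      simp only [List.foldl_cons, List.map_cons, hslice, hlen,
        pvALoop_nil_acc ((pvBaseS t).1.toList.length) (text.toList.drop o)]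
      simp only [hsub]
      rw [ih]
      simp only [pvEmitA, List.append_assoc, List.singleton_append]

-- B's offsets fold is the scan of base lengths
lemma pvOffs_eq (bs : List (String × Bool)) (os : List Int) (l : Int)
    (h : os.getLast? = some l) :
    bs.foldl (fun (os : List Int) b => os ++ [PySem.List.pyGetD os (-1) 0 + PySem.Str.len b.1]) os
      = os ++ pvScan bs l := by
  induction bs generalizing os l with
  | nil => simp [pvScan]
  | cons b bs ih =>
      have hne : os ≠ [] := by rintro rfl; simp at h
      have hlast : PySem.List.pyGetD os (-1) 0 = l := by
        rw [PySem.List.pyGetD_neg_one os 0 hne]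
        exact (List.getLast_eq_iff_getLast?_eq_some hne).mpr h
      simp only [List.foldl_cons, hlast]
      rw [ih (os ++ [l + PySem.Str.len b.1]) (l + PySem.Str.len b.1) (by simp)]
      simp [pvScan]

-- the zip-map emit pass is pvEmitB
lemma pvZip_eq (text : String) (bs : List (String × Bool)) (n : Nat) :
    (bs.zip ((n : Int) :: pvScan bs (n : Int))).map (fun p =>
      String.ofList ((if p.1.2 then ['#', '#'] else []) ++
        PySem.List.slice text.toList (some p.2) (some (p.2 + PySem.Str.len p.1.1))))
      = pvEmitB text.toList bs n := by
  induction bs generalizing n with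
  | nil => simp [pvEmitB]
  | cons b bs ih =>
      simp only [pvScan, List.zip_cons_cons, List.map_cons, pvEmitB]
      congr 1
      · rw [pvStrLen_eq, PySem.List.slice_natCast_add]
      · have h2 : (n : Int) + PySem.Str.len b.1 = ((n + b.1.toList.length : Nat) : Int) := by
          rw [pvStrLen_eq]
          push_cast
          ring
        rw [h2]
        exact ih (n + b.1.toList.length)

lemma pvB_eq (text : String) (tokens : List String) :
    restore_tokenized_text_alt text tokens = pvEmitB text.toList (tokens.map pvBaseS) 0 := by
  simp only [restore_tokenized_text_alt]
  have hb : tokens.map (fun t =>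
      if PySem.Str.startswith t "##" then (PySem.Str.slice t (some 2) none, true) else (t, false))
      = tokens.map pvBaseS := by
    apply List.map_congr_left
    intro t _
    unfold pvBaseS
    rfl
  rw [hb, pvOffs_eq (tokens.map pvBaseS) [0] 0 (by simp), List.singleton_append]
  have h0 : (0 : Int) = ((0 : Nat) : Int) := by norm_num
  rw [h0, pvZip_eq text (tokens.map pvBaseS) 0]

-- ===== VERDICT (by name: the statement is the Claim_ definition above) =====
theorem restore_tokenized_text_spec : Claim_equal_restore_tokenized_text := by
  intro text tokens _ hpre
  unfold Spec_restore_tokenized_text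
  rw [pvB_eq]
  simp only [restore_tokenized_text]
  rw [pvA_eq text tokens [] 0, List.nil_append]
  have h0 : (0 : Nat) = min 0 text.toList.length := by simp
  rw [h0]
  apply pvEmit_eq
  intro i hi hz
  simp only [List.length_map] at hi
  by_contra hlt
  apply hpre
  refine ⟨i, List.mem_range.mpr hi, ?_, ?_⟩
  · have hget : tokens.getD i "" = tokens[i] := List.getD_eq_getElem tokens "" hi
    rw [hget, pvBaseLen_eq]
    have hbi : (tokens.map pvBaseS)[i] = pvBaseS tokens[i] := by simp
    rw [hbi] at hz
    exact_mod_cast hz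
  · rw [pvStrLen_eq, pvSum_eq]
    have hlt2 : ((tokens.take i).map (fun t => (pvBaseS t).1.toList.length)).sum
        < text.toList.length := by
      have hmt : (tokens.take i).map (fun t => (pvBaseS t).1.toList.length)
          = ((tokens.map pvBaseS).take i).map (fun p => p.1.toList.length) := by
        rw [← List.map_take, List.map_map]
        rfl
      rw [hmt]
      omega
    exact_mod_cast hlt2
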